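-- pv_equiv track=rewrite | github.com/ZechCodes/advent-of-code | 2021/day8/solution.py | separate_inputs_and_outputs
-- ===== SOURCE A (Python) =====
-- from typing import Iterator
--
-- Digits = list[list[str]]
--
-- def separate_inputs_and_outputs(data: Iterator[list[str]]) -> tuple[Digits, Digits]:
--     inputs: list[list[str]] = []
--     outputs: list[list[str]] = []
--
--     for line in data:
--         inputs.append(current := [])
--
--         for digit in line:
--             if digit == "|":
--                 outputs.append((current := []))
--
--             else:
--                 current.append(digit)
--
--     return inputs, outputs
-- ===== SOURCE B (Python) =====
-- from typing import Iterator
--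
-- Digits = list[list[str]]
--
--
-- def split_pipe(line: list[str]) -> Digits:
--     """Split a token list on the first "|" recursively, keeping empty segments."""
--     if "|" not in line:
--         return [line]
--     i = line.index("|")
--     return [line[:i]] + split_pipe(line[i + 1:])
--
--
-- def separate_inputs_and_outputs(data: Iterator[list[str]]) -> tuple[Digits, Digits]:
--     segments = [split_pipe(line) for line in data]
--     return [s[0] for s in segments], [seg for s in segments for seg in s[1:]]
-- ===== Notes on version B (the rewrite author's own statement) =====
-- stated objective: simpler
-- what changed: Replaces A's shared-mutable 'current' list that is interleaved into inputs/outputs via a redirected reference with a pure recursive split_pipe (cut at the first '|', recurse on the rest) followed by comprehensions routing each line's first segment to inputs and the rest to outputs.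
import Mathlib
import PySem

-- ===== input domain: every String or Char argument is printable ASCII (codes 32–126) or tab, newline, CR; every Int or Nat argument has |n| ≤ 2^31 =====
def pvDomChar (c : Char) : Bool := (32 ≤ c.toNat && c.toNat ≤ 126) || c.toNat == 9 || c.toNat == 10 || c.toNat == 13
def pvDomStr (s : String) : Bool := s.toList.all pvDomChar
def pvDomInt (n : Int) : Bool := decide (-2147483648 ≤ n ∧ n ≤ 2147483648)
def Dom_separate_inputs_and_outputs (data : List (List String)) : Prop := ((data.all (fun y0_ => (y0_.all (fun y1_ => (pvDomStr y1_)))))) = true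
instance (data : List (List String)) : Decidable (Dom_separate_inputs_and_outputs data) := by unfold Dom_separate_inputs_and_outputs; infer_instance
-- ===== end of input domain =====

-- B replaces A's shared-mutable `current` reference interleaved into both result lists with a
-- pure recursive split-at-first-"|" plus comprehension routing; objective: simpler, same cost.

-- ===== PORT A =====
-- A's inner loop: `current` is a list mutated in place after its reference was appended to
-- inputs (flag = false) or outputs (flag = true); we carry `current` explicitly and flush it
-- to its destination when a "|" redirects the reference and at end of line — the final list
-- values are exactly Python's.
def aGo : List String → List String → Bool → List (List String) → List (List String) →
    List (List String) × List (List String)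
  | [], cur, flag, inps, outs =>
      if flag then (inps, outs ++ [cur]) else (inps ++ [cur], outs)
  | d :: rest, cur, flag, inps, outs =>
      if d = "|" then
        aGo rest [] true (if flag then inps else inps ++ [cur])
          (if flag then outs ++ [cur] else outs)
      else
        aGo rest (cur ++ [d]) flag inps outs

def separate_inputs_and_outputs (data : List (List String)) :
    List (List String) × List (List String) :=
  data.foldl (fun acc line => aGo line [] false acc.1 acc.2) ([], [])

-- ===== PORT B =====
-- split_pipe: `"|" not in line` → ∉ ; line.index("|") → idxOf (in range since "|" ∈ line);
-- line[:i] → take i and line[i+1:] → drop (i+1), exact for this in-range non-negative index.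
def splitPipe (line : List String) : List (List String) :=
  if _h : "|" ∈ line then
    [line.take (line.idxOf "|")] ++ splitPipe (line.drop (line.idxOf "|" + 1))
  else [line]
termination_by line.length
decreasing_by
  simp only [List.length_drop]
  have := List.idxOf_lt_length_of_mem _h
  omega

-- s[0] ported as headD [] (splitPipe never returns an empty list).
def separate_inputs_and_outputs_alt (data : List (List String)) :
    List (List String) × List (List String) :=
  let segments := data.map splitPipe
  (segments.map (fun s => s.headD []), segments.flatMap (fun s => s.tail))

-- ===== PRECONDITION & SPEC =====
def Spec_separate_inputs_and_outputs (data : List (List String)) (out : List (List String) × List (List String)) : Prop := out = separate_inputs_and_outputs_alt data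
instance (data : List (List String)) (out : List (List String) × List (List String)) : Decidable (Spec_separate_inputs_and_outputs data out) := by unfold Spec_separate_inputs_and_outputs; infer_instance

-- ===== CLAIM (what is proved, stated in full; the proofs are below) =====
def Claim_equal_separate_inputs_and_outputs : Prop := ∀ (data : List (List String)), Dom_separate_inputs_and_outputs data → Spec_separate_inputs_and_outputs data (separate_inputs_and_outputs data)

-- ===== LEMMAS AND PROOFS =====

theorem splitPipe_ne_nil (l : List String) : splitPipe l ≠ [] := by
  unfold splitPipe
  split <;> simp

theorem splitPipe_decomp (l : List String) :
    (splitPipe l).headD [] :: (splitPipe l).tail = splitPipe l := by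
  cases h : splitPipe l with
  | nil => exact absurd h (splitPipe_ne_nil l)
  | cons a t => rfl

theorem splitPipe_nil : splitPipe [] = [[]] := by
  unfold splitPipe; simp

theorem splitPipe_pipe (rest : List String) :
    splitPipe ("|" :: rest) = [] :: splitPipe rest := by
  rw [splitPipe]
  simp

theorem splitPipe_cons (d : String) (rest : List String) (hd : d ≠ "|") :
    splitPipe (d :: rest) =
      (d :: (splitPipe rest).headD []) :: (splitPipe rest).tail := by
  by_cases hm : "|" ∈ rest
  · rw [splitPipe]
    have hmem : "|" ∈ d :: rest := List.mem_cons_of_mem _ hm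
    have hb : (d == "|") = false := beq_eq_false_iff_ne.mpr hd
    have hidx : (d :: rest).idxOf "|" = rest.idxOf "|" + 1 := by
      simp [List.idxOf_cons, hb]
    rw [dif_pos hmem, hidx]
    conv_rhs => rw [splitPipe, dif_pos hm]
    simp [List.take_succ_cons, List.drop_succ_cons]
  · have hm2 : "|" ∉ d :: rest := by
      intro h
      rcases List.mem_cons.mp h with h | h
      · exact hd h.symm
      · exact hm h
    rw [splitPipe, dif_neg hm2]
    conv_rhs => rw [splitPipe, dif_neg hm]
    simp

theorem aGo_eq (line : List String) : ∀ (cur : List String) (inps outs : List (List String)),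
    aGo line cur false inps outs
      = (inps ++ [cur ++ (splitPipe line).headD []], outs ++ (splitPipe line).tail) ∧
    aGo line cur true inps outs
      = (inps, outs ++ [cur ++ (splitPipe line).headD []] ++ (splitPipe line).tail) := by
  induction line with
  | nil =>
    intro cur inps outs
    simp [aGo, splitPipe_nil]
  | cons d rest ih =>
    intro cur inps outs
    by_cases hd : d = "|"
    · subst hd
      constructor
      · rw [aGo, if_pos rfl, if_neg (by simp), if_neg (by simp)]
        rw [(ih [] (inps ++ [cur]) outs).2]
        simp [splitPipe_pipe]
        simpa using splitPipe_decomp rest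
      · rw [aGo, if_pos rfl, if_pos rfl, if_pos rfl]
        rw [(ih [] inps (outs ++ [cur])).2]
        simp [splitPipe_pipe]
        simpa using splitPipe_decomp rest
    · constructor
      · rw [aGo, if_neg hd]
        rw [(ih (cur ++ [d]) inps outs).1]
        simp [splitPipe_cons d rest hd]
      · rw [aGo, if_neg hd]
        rw [(ih (cur ++ [d]) inps outs).2]
        simp [splitPipe_cons d rest hd]

theorem fold_eq (data : List (List String)) : ∀ (inps outs : List (List String)),
    data.foldl (fun acc line => aGo line [] false acc.1 acc.2) (inps, outs)
      = (inps ++ data.map (fun l => (splitPipe l).headD []),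
         outs ++ data.flatMap (fun l => (splitPipe l).tail)) := by
  induction data with
  | nil => intro inps outs; simp
  | cons l rest ih =>
    intro inps outs
    simp only [List.foldl_cons]
    rw [(aGo_eq l [] inps outs).1, ih]
    simp

-- ===== VERDICT (by name: the statement is the Claim_ definition above) =====
theorem separate_inputs_and_outputs_spec : Claim_equal_separate_inputs_and_outputs := by
  intro data _
  unfold Spec_separate_inputs_and_outputs separate_inputs_and_outputs
    separate_inputs_and_outputs_alt
  rw [fold_eq]
  simp [List.flatMap_map, Function.comp]
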